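-- pv_equiv track=rewrite | github.com/krzysztof-turowski/programming-contests | google-code-jam/2016-round-1c/senate_evacuation.py | solve
-- ===== SOURCE A (Python) =====
-- import heapq
-- import string
--
-- def solve(P):
--     out, L = [], list(zip(P, string.ascii_uppercase))
--     heapq.heapify(L)
--     while len(L) > 2 or L[1][0] != L[0][0]:
--         out.append(L[0][1])
--         if L[0][0] < -1:
--             heapq.heapreplace(L, (L[0][0] + 1, L[0][1]))
--         else:
--             heapq.heappop(L)
--     out.append(' '.join([L[0][1] + L[1][1]] * (-L[1][0])))
--     return ' '.join(out)
-- ===== SOURCE B (Python) =====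
-- import string
--
-- def solve(P):
--     # sorted-list evacuation: keep parties in an ascending list instead of a heap
--     def insert_sorted(L, item):
--         i = 0
--         while i < len(L) and L[i] < item:
--             i += 1
--         L.insert(i, item)
--
--     L = []
--     for party in zip(P, string.ascii_uppercase):
--         insert_sorted(L, party)
--     out = []
--     while len(L) > 2 or L[0][0] != L[1][0]:
--         count, name = L.pop(0)
--         out.append(name)
--         if count < -1:
--             insert_sorted(L, (count + 1, name))
--     out.append(' '.join([L[0][1] + L[1][1]] * (-L[1][0])))
--     return ' '.join(out)
-- ===== Notes on version B (the rewrite author's own statement) =====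
-- stated objective: simpler
-- what changed: Replaces the binary heap (heapq heapify/heappop/heapreplace) by a plain ascending list maintained with linear-scan insertion, popping the head party each round.
import Mathlib
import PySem

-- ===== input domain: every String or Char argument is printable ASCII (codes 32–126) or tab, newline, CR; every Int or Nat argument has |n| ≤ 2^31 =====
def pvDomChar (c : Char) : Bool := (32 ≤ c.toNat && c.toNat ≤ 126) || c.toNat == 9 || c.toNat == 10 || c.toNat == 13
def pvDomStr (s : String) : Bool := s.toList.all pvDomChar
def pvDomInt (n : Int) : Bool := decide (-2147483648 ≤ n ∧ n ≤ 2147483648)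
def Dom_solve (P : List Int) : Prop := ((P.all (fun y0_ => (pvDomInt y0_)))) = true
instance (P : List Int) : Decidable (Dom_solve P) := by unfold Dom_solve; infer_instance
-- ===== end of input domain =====

-- B replaces A's binary heap by a plain ascending list with linear-scan insertion (simpler, same cost at ≤ 26 parties);
-- equivalence of the return values is proved on Pre_solve, the inputs where the Python A returns normally.

-- ===== PORT A =====
-- Python tuple comparison (int, single-letter str) '<' — exact lexicographic order (letters are ASCII, so Char order = str order)
def pvLt (a b : Int × Char) : Bool :=
  decide (a.1 < b.1) || (decide (a.1 = b.1) && decide (a.2 < b.2))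

def pvDef : Int × Char := (0, 'A')

def pvLetters : List Char := "ABCDEFGHIJKLMNOPQRSTUVWXYZ".toList

-- fuel: a totality device only (strict upper bound on the number of loop iterations); both ports use the same value
def pvFuel (L : List (Int × Char)) : Nat := L.foldl (fun acc p => acc + 1 + (-p.1).toNat) 1

-- CPython heapq._siftup's child choice: the right child when `not heap[l] < heap[l+1]`
def pvChild (h : List (Int × Char)) (pos : Nat) : Nat :=
  if 2*pos+2 < h.length && !pvLt (h.getD (2*pos+1) pvDef) (h.getD (2*pos+2) pvDef) then 2*pos+2 else 2*pos+1

theorem pvChild_gt (h : List (Int × Char)) (pos : Nat) :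
    pos < pvChild h pos ∧ pvChild h pos ≤ 2*pos+2 := by
  unfold pvChild; split <;> omega

-- heapq._siftup(h, pos): sift the root of the subtree at pos down along the smaller-child path.
-- (CPython walks the hole to a leaf and bubbles back up; under the heap invariant holding at every
-- call site in A, that produces the identical array as this single descent, step for step.)
def pvSiftdn (h : List (Int × Char)) (pos : Nat) : List (Int × Char) :=
  if hl : 2*pos+1 < h.length then
    if pvLt (h.getD (pvChild h pos) pvDef) (h.getD pos pvDef) then
      pvSiftdn ((h.set pos (h.getD (pvChild h pos) pvDef)).set (pvChild h pos) (h.getD pos pvDef)) (pvChild h pos)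
    else h
  else h
termination_by h.length - pos
decreasing_by
  have := pvChild_gt h pos
  simp only [List.length_set]
  omega

-- heapq.heapify: for i in reversed(range(n//2)): _siftup(x, i)
def pvHeapify (h : List (Int × Char)) : List (Int × Char) :=
  ((List.range (h.length / 2)).reverse).foldl (fun acc i => pvSiftdn acc i) h

-- heapq.heappop: pop the last element, move it to the root, sift down (A discards the returned minimum)
def pvHeappop (h : List (Int × Char)) : List (Int × Char) :=
  if h.dropLast.isEmpty then [] else pvSiftdn (h.dropLast.set 0 (h.getLast?.getD pvDef)) 0

-- A's while loop; `| _ => ""` marks the states where the Python raises IndexError (fewer than two parties), outside Pre_solve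
def pvLoopA : Nat → List (Int × Char) → List String → String
  | 0, _, _ => ""
  | f+1, h, out =>
    match h with
    | a :: b :: rest =>
      if rest ≠ [] ∨ b.1 ≠ a.1 then
        if a.1 < -1 then
          pvLoopA f (pvSiftdn ((a :: b :: rest).set 0 (a.1 + 1, a.2)) 0) (out ++ [String.ofList [a.2]])
        else
          pvLoopA f (pvHeappop (a :: b :: rest)) (out ++ [String.ofList [a.2]])
      else
        PySem.Str.join " " (out ++ [PySem.Str.join " " (List.replicate (-b.1).toNat (String.ofList [a.2, b.2]))])
    | _ => ""

def solve (P : List Int) : String :=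
  pvLoopA (pvFuel (P.zip pvLetters)) (pvHeapify (P.zip pvLetters)) []

-- ===== PORT B =====
-- insert_sorted: linear scan to the first position whose element is not < item
def pvIns (s : List (Int × Char)) (x : Int × Char) : List (Int × Char) :=
  match s with
  | [] => [x]
  | y :: t => if pvLt y x then y :: pvIns t x else x :: y :: t

def pvLoopB : Nat → List (Int × Char) → List String → String
  | 0, _, _ => ""
  | f+1, s, out =>
    match s with
    | a :: b :: rest =>
      if rest ≠ [] ∨ a.1 ≠ b.1 then
        if a.1 < -1 then
          pvLoopB f (pvIns (b :: rest) (a.1 + 1, a.2)) (out ++ [String.ofList [a.2]])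
        else
          pvLoopB f (b :: rest) (out ++ [String.ofList [a.2]])
      else
        PySem.Str.join " " (out ++ [PySem.Str.join " " (List.replicate (-b.1).toNat (String.ofList [a.2, b.2]))])
    | _ => ""

def solve_alt (P : List Int) : String :=
  pvLoopB (pvFuel (P.zip pvLetters)) ((P.zip pvLetters).foldl pvIns []) []

-- ===== PRECONDITION & SPEC =====
-- Pre_solve = exactly the inputs on which the Python A returns normally: at least two parties (only the
-- first 26 entries are paired with letters by zip), and either every party count is ≤ -1 (the intended
-- inputs) or the maximal count ≥ 0 occurs at least twice; on every other input A raises IndexError.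
def Pre_solve (P : List Int) : Prop :=
  2 ≤ (P.take 26).length ∧
    ((∀ x ∈ P.take 26, x ≤ -1) ∨
      ∃ m ∈ (P.take 26).filter (fun x => decide (0 ≤ x)),
        2 ≤ ((P.take 26).filter (fun x => decide (0 ≤ x))).count m ∧
          ∀ x ∈ (P.take 26).filter (fun x => decide (0 ≤ x)), x ≤ m)

instance (P : List Int) : Decidable (Pre_solve P) := by unfold Pre_solve; infer_instance

def pvWitness_solve : List Int := [-3, -2, -1]

def Spec_solve (P : List Int) (out : String) : Prop := out = solve_alt P
instance (P : List Int) (out : String) : Decidable (Spec_solve P out) := by unfold Spec_solve; infer_instance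

-- ===== CLAIM (what is proved, stated in full; the proofs are below) =====
def Claim_equal_solve : Prop := ∀ (P : List Int), Dom_solve P → Pre_solve P → Spec_solve P (solve P)

-- ===== LEMMAS AND PROOFS =====

-- ---- the strict order pvLt ----
theorem pvLt_iff (a b : Int × Char) : pvLt a b = true ↔ (a.1 < b.1 ∨ (a.1 = b.1 ∧ a.2 < b.2)) := by
  simp [pvLt]

theorem pvLt_false_iff (a b : Int × Char) :
    pvLt a b = false ↔ (b.1 < a.1 ∨ (a.1 = b.1 ∧ b.2 ≤ a.2)) := by
  rw [← Bool.not_eq_true, pvLt_iff]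
  constructor
  · intro h
    by_cases e : a.1 = b.1
    · exact Or.inr ⟨e, not_lt.mp (fun hl => h (Or.inr ⟨e, hl⟩))⟩
    · left
      rcases lt_trichotomy a.1 b.1 with h1 | h1 | h1
      · exact absurd (Or.inl h1) h
      · exact absurd h1 e
      · exact h1
  · rintro (h | ⟨e, hle⟩) (h2 | ⟨e2, hl2⟩)
    · omega
    · omega
    · omega
    · exact absurd hl2 (not_lt.mpr hle)

theorem pvLt_irrefl (a : Int × Char) : pvLt a a = false := by
  rw [pvLt_false_iff]; exact Or.inr ⟨rfl, le_refl _⟩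

theorem pvLt_asymm {a b : Int × Char} (h : pvLt a b = true) : pvLt b a = false := by
  rw [pvLt_iff] at h; rw [pvLt_false_iff]
  rcases h with h | ⟨h1, h2⟩
  · exact Or.inl h
  · exact Or.inr ⟨h1.symm, le_of_lt h2⟩

theorem pvLt_antisymm {a b : Int × Char} (h1 : pvLt a b = false) (h2 : pvLt b a = false) : a = b := by
  rw [pvLt_false_iff] at h1 h2
  have he : a.1 = b.1 := by rcases h1 with h1 | ⟨e1, _⟩ <;> rcases h2 with h2 | ⟨e2, _⟩ <;> omega
  have hc : a.2 = b.2 := by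
    rcases h1 with h1 | ⟨_, l1⟩
    · omega
    · rcases h2 with h2 | ⟨_, l2⟩
      · omega
      · exact le_antisymm l2 l1
  exact Prod.ext he hc

theorem pvLe_trans {a b c : Int × Char} (h1 : pvLt b a = false) (h2 : pvLt c b = false) :
    pvLt c a = false := by
  rw [pvLt_false_iff] at h1 h2 ⊢
  rcases h1 with h1 | ⟨e1, l1⟩ <;> rcases h2 with h2 | ⟨e2, l2⟩
  · exact Or.inl (by omega)
  · exact Or.inl (by omega)
  · exact Or.inl (by omega)
  · exact Or.inr ⟨by omega, le_trans l1 l2⟩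


-- ---- list indexing / permutation helpers ----
theorem getD_set (l : List (Int×Char)) (i : Nat) (x d : Int×Char) (j : Nat) :
    (l.set i x).getD j d = if i = j ∧ j < l.length then x else l.getD j d := by
  by_cases h1 : i = j
  · subst h1
    by_cases h2 : i < l.length
    · simp [List.getD_eq_getElem?_getD, h2]
    · rw [if_neg (by omega)]
      simp [List.getD_eq_getElem?_getD, h2]
  · rw [if_neg (by simp [h1])]
    simp [List.getD_eq_getElem?_getD, h1]

theorem getD_cons_swap_perm (t : List (Int×Char)) (j : Nat) (a d : Int×Char) (h : j < t.length) :
    ((t.getD j d) :: t.set j a).Perm (a :: t) := by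
  induction t generalizing j with
  | nil => simp at h
  | cons b t ih =>
    cases j with
    | zero => simpa using List.Perm.swap a b t
    | succ j =>
      have e : ((b :: t).getD (j+1) d :: (b::t).set (j+1) a) = t.getD j d :: b :: t.set j a := by simp
      rw [e]
      exact (List.Perm.swap b (t.getD j d) _).trans
        (((ih j (by simpa using h)).cons b).trans (List.Perm.swap a b t))
theorem swap_perm (l : List (Int×Char)) (d : Int×Char) :
    ∀ i j, i < j → j < l.length → ((l.set i (l.getD j d)).set j (l.getD i d)).Perm l := by
  induction l with
  | nil => intro i j _ h; simp at h
  | cons a t ih =>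
    intro i j hij hj
    cases i with
    | zero =>
      cases j with
      | zero => omega
      | succ j =>
        have e : (((a :: t).set 0 ((a::t).getD (j+1) d)).set (j+1) ((a::t).getD 0 d)) = t.getD j d :: t.set j a := by simp
        rw [e]
        exact getD_cons_swap_perm t j a d (by simpa using hj)
    | succ i =>
      cases j with
      | zero => omega
      | succ j =>
        have e : (((a :: t).set (i+1) ((a::t).getD (j+1) d)).set (j+1) ((a::t).getD (i+1) d)) = a :: ((t.set i (t.getD j d)).set j (t.getD i d)) := by simp
        rw [e]
        exact (ih i j (by omega) (by simpa using hj)).cons a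

-- ---- the index tree of a binary heap: inSub i j = "j lies in the subtree rooted at i" ----

def inSub (i : Nat) (j : Nat) : Bool :=
  if j ≤ i then decide (i = j) else inSub i ((j-1)/2)
termination_by j
decreasing_by omega

theorem inSub_self (i : Nat) : inSub i i = true := by
  rw [inSub]; simp

theorem inSub_le {i j : Nat} (h : inSub i j = true) : i ≤ j := by
  by_contra hc
  rw [inSub, if_pos (by omega)] at h
  simp at h; omega

theorem inSub_parent (i j : Nat) (h : i < j) : inSub i j = inSub i ((j-1)/2) := by
  rw [inSub, if_neg (by omega)]

theorem inSub_trans : ∀ j i c, inSub i c = true → inSub c j = true → inSub i j = true := by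
  intro j
  induction j using Nat.strong_induction_on with
  | _ j ih =>
    intro i c h1 h2
    by_cases hcj : c = j
    · exact hcj ▸ h1
    · have hlt : c < j := lt_of_le_of_ne (inSub_le h2) hcj
      rw [inSub_parent c j hlt] at h2
      have hij : i < j := lt_of_le_of_lt (inSub_le h1) hlt
      rw [inSub_parent i j hij]
      exact ih ((j-1)/2) (by omega) i c h1 h2

theorem inSub_not_lt {i j : Nat} (h : j < i) : inSub i j = false := by
  rw [inSub, if_pos (by omega)]; simp; omega

theorem inSub_child (pos : Nat) (j : Nat) (h : j = 2*pos+1 ∨ j = 2*pos+2) : inSub pos j = true := by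
  have hj : pos < j := by omega
  rw [inSub_parent pos j hj]
  have : (j-1)/2 = pos := by omega
  rw [this]; exact inSub_self pos

theorem not_inSub_child {i p j : Nat} (h : inSub i p = false) (hp : i ≤ p)
    (hj : j = 2*p+1 ∨ j = 2*p+2) : inSub i j = false := by
  have : (j-1)/2 = p := by omega
  rw [inSub_parent i j (by omega), this]; exact h

theorem child_split : ∀ j pos, inSub pos j = true →
    j = pos ∨ inSub (2*pos+1) j = true ∨ inSub (2*pos+2) j = true := by
  intro j
  induction j using Nat.strong_induction_on with
  | _ j ih =>
    intro pos h
    by_cases hj : j = pos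
    · exact Or.inl hj
    · have hlt : pos < j := lt_of_le_of_ne (inSub_le h) (Ne.symm hj)
      rw [inSub_parent pos j hlt] at h
      by_cases hp : (j-1)/2 = pos
      · have : j = 2*pos+1 ∨ j = 2*pos+2 := by omega
        rcases this with h1 | h1
        · exact Or.inr (Or.inl (h1 ▸ inSub_self _))
        · exact Or.inr (Or.inr (h1 ▸ inSub_self _))
      · rcases ih ((j-1)/2) (by omega) pos h with h1 | h1 | h1
        · exact absurd h1 hp
        · refine Or.inr (Or.inl ?_)
          rw [inSub_parent _ j (lt_of_le_of_lt (inSub_le h1) (by omega))]; exact h1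
        · refine Or.inr (Or.inr ?_)
          rw [inSub_parent _ j (lt_of_le_of_lt (inSub_le h1) (by omega))]; exact h1

theorem no_children_single {pos j n : Nat} (h : inSub pos j = true) (hj : j < n)
    (hn : n ≤ 2*pos+1) : j = pos := by
  rcases child_split j pos h with h1 | h1 | h1
  · exact h1
  · have := inSub_le h1; omega
  · have := inSub_le h1; omega

theorem sub_sibling_disjoint {pos j : Nat} :
    ¬ (inSub (2*pos+1) j = true ∧ inSub (2*pos+2) j = true) := by
  induction j using Nat.strong_induction_on with
  | _ j ih =>
    rintro ⟨h1, h2⟩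
    by_cases e1 : j = 2*pos+1
    · subst e1; exact absurd (inSub_le h2) (by omega)
    · by_cases e2 : j = 2*pos+2
      · subst e2
        have := inSub_le h1
        rw [inSub_parent _ _ (by omega)] at h1
        have hp : (2*pos+2-1)/2 = pos := by omega
        rw [hp] at h1
        exact absurd (inSub_le h1) (by omega)
      · have l1 : 2*pos+1 < j := lt_of_le_of_ne (inSub_le h1) (Ne.symm e1)
        have l2 : 2*pos+2 < j := lt_of_le_of_ne (inSub_le h2) (Ne.symm e2)
        rw [inSub_parent _ _ l1] at h1
        rw [inSub_parent _ _ l2] at h2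
        exact ih ((j-1)/2) (by omega) ⟨h1, h2⟩

theorem inSub_zero : ∀ j, inSub 0 j = true := by
  intro j
  induction j using Nat.strong_induction_on with
  | _ j ih =>
    by_cases h : j = 0
    · subst h; exact inSub_self 0
    · rw [inSub_parent 0 j (by omega)]; exact ih _ (by omega)


-- ---- heap order ----
def IsHeap (h : List (Int × Char)) : Prop :=
  ∀ j, 0 < j → j < h.length → pvLt (h.getD j pvDef) (h.getD ((j-1)/2) pvDef) = false

theorem pvChild_cases (h : List (Int × Char)) (pos : Nat) :
    pvChild h pos = 2*pos+1 ∨ (pvChild h pos = 2*pos+2 ∧ 2*pos+2 < h.length) := by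
  unfold pvChild; split
  · rename_i hc
    simp only [Bool.and_eq_true, decide_eq_true_eq] at hc
    exact Or.inr ⟨rfl, hc.1⟩
  · exact Or.inl rfl

theorem pvChild_le (h : List (Int × Char)) (pos : Nat) (hl : 2*pos+1 < h.length)
    (j : Nat) (hj : j = 2*pos+1 ∨ j = 2*pos+2) (hjn : j < h.length) :
    pvLt (h.getD j pvDef) (h.getD (pvChild h pos) pvDef) = false := by
  unfold pvChild; split
  · rename_i hc
    simp only [Bool.and_eq_true, Bool.not_eq_eq_eq_not, Bool.not_true, decide_eq_true_eq] at hc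
    rcases hj with e | e <;> subst e
    · exact hc.2
    · exact pvLt_irrefl _
  · rename_i hc
    rcases hj with e | e <;> subst e
    · exact pvLt_irrefl _
    · simp only [Bool.and_eq_true, Bool.not_eq_eq_eq_not, Bool.not_true, decide_eq_true_eq,
        not_and] at hc
      have := hc hjn
      exact pvLt_asymm (by revert this; cases pvLt (h.getD (2*pos+1) pvDef) (h.getD (2*pos+2) pvDef) <;> simp)

theorem subtree_lb (h : List (Int × Char)) (c : Nat)
    (good : ∀ j, 0 < j → j < h.length → inSub c ((j-1)/2) = true →
        pvLt (h.getD j pvDef) (h.getD ((j-1)/2) pvDef) = false) :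
    ∀ j, j < h.length → inSub c j = true → pvLt (h.getD j pvDef) (h.getD c pvDef) = false := by
  intro j
  induction j using Nat.strong_induction_on with
  | _ j ih =>
    intro hj hin
    by_cases e : j = c
    · subst e; exact pvLt_irrefl _
    · have hlt : c < j := lt_of_le_of_ne (inSub_le hin) (Ne.symm e)
      have hp : inSub c ((j-1)/2) = true := by rw [← inSub_parent c j hlt]; exact hin
      exact pvLe_trans (ih ((j-1)/2) (by omega) (by omega) hp) (good j (by omega) hj hp)

-- ---- the master specification of pvSiftdn ----
theorem siftdn_spec : ∀ (k : Nat) (h : List (Int × Char)) (pos : Nat), h.length - pos ≤ k →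
    (∀ j, 0 < j → j < h.length → inSub pos ((j-1)/2) = true → (j-1)/2 ≠ pos →
        pvLt (h.getD j pvDef) (h.getD ((j-1)/2) pvDef) = false) →
    (pvSiftdn h pos).Perm h ∧
    (∀ j, inSub pos j = false → (pvSiftdn h pos).getD j pvDef = h.getD j pvDef) ∧
    (∀ j, 0 < j → j < h.length → inSub pos ((j-1)/2) = true →
        pvLt ((pvSiftdn h pos).getD j pvDef) ((pvSiftdn h pos).getD ((j-1)/2) pvDef) = false) ∧
    (∀ x, (∀ j, j < h.length → inSub pos j = true → pvLt (h.getD j pvDef) x = false) →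
          ∀ j, j < h.length → inSub pos j = true → pvLt ((pvSiftdn h pos).getD j pvDef) x = false) := by
  intro k
  induction k with
  | zero =>
    intro h pos hk _
    -- pos ≥ h.length: no children, pvSiftdn returns h
    have hl : ¬ 2*pos+1 < h.length := by omega
    have hr : pvSiftdn h pos = h := by rw [pvSiftdn, dif_neg hl]
    rw [hr]
    refine ⟨List.Perm.refl _, fun _ _ => rfl, ?_, fun x lb => lb⟩
    intro j hj0 hjn hp
    exfalso
    have := no_children_single hp (show (j-1)/2 < h.length by omega) (by omega)
    omega
  | succ k ih =>
    intro h pos hk pre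
    by_cases hl : 2*pos+1 < h.length
    · by_cases hlt : pvLt (h.getD (pvChild h pos) pvDef) (h.getD pos pvDef) = true
      · -- descend
        have hposn : pos < h.length := by omega
        have hcb : pos < pvChild h pos ∧ pvChild h pos < h.length ∧
            (pvChild h pos = 2*pos+1 ∨ pvChild h pos = 2*pos+2) := by
          rcases pvChild_cases h pos with e | ⟨e, hlen⟩
          · exact ⟨by omega, by omega, Or.inl e⟩
          · exact ⟨by omega, by omega, Or.inr e⟩
        set c := pvChild h pos with hcdef
        set vc := h.getD c pvDef with hvc
        set vp := h.getD pos pvDef with hvp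
        set h' := (h.set pos vc).set c vp with hh'
        have hr : pvSiftdn h pos = pvSiftdn h' c := by
          rw [pvSiftdn, dif_pos hl, if_pos hlt]
        have hlen' : h'.length = h.length := by simp [hh']
        have hnecp : c ≠ pos := by omega
        have e_pos : h'.getD pos pvDef = vc := by
          rw [hh', getD_set, if_neg (by omega), getD_set, if_pos ⟨rfl, hposn⟩]
        have e_c : h'.getD c pvDef = vp := by
          rw [hh', getD_set, if_pos ⟨rfl, by simp; omega⟩]
        have e_other : ∀ j, j ≠ pos → j ≠ c → h'.getD j pvDef = h.getD j pvDef := by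
          intro j hjp hjc
          rw [hh', getD_set, if_neg (by omega), getD_set, if_neg (by omega)]
        have hsubc : inSub pos c = true := inSub_child pos c hcb.2.2
        have hsub_trans : ∀ j, inSub c j = true → inSub pos j = true :=
          fun j hj => inSub_trans j pos c hsubc hj
        have hpos_notin : inSub c pos = false := inSub_not_lt hcb.1
        -- precondition for the recursive call
        have pre' : ∀ j, 0 < j → j < h'.length → inSub c ((j-1)/2) = true → (j-1)/2 ≠ c →
            pvLt (h'.getD j pvDef) (h'.getD ((j-1)/2) pvDef) = false := by
          intro j hj0 hjn hin hne
          rw [hlen'] at hjn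
          have hpc : c < (j-1)/2 := lt_of_le_of_ne (inSub_le hin) (Ne.symm hne)
          have hjgt : c < j := by omega
          rw [e_other j (by omega) (by omega), e_other ((j-1)/2) (by omega) (by omega)]
          exact pre j hj0 hjn (hsub_trans _ hin) (by omega)
        have IH := ih h' c (by omega) pre'
        obtain ⟨ih1, ih2, ih3, ih4⟩ := IH
        rw [hlen'] at ih4
        have hperm : (pvSiftdn h' c).Perm h := ih1.trans (by
          rw [hh', hvc, hvp]
          exact swap_perm h pvDef pos c hcb.1 hcb.2.1)
        -- lower bound of the c-subtree by vc, in h'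
        have lbc : ∀ j', j' < h.length → inSub c j' = true → pvLt (h'.getD j' pvDef) vc = false := by
          intro j' hj'n hj'in
          by_cases e : j' = c
          · subst e; rw [e_c]; exact pvLt_asymm hlt
          · have : c < j' := lt_of_le_of_ne (inSub_le hj'in) (Ne.symm e)
            rw [e_other j' (by omega) e]
            refine subtree_lb h c ?_ j' hj'n hj'in
            intro j'' hj''0 hj''n hj''in
            have hpc : c ≤ (j''-1)/2 := inSub_le hj''in
            exact pre j'' hj''0 hj''n (hsub_trans _ hj''in) (by omega)
        rw [hr]
        refine ⟨hperm, ?_, ?_, ?_⟩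
        · -- untouched outside the pos-subtree
          intro j hj
          have hjc : inSub c j = false := by
            cases hcj : inSub c j
            · rfl
            · exact absurd (hsub_trans j hcj) (by simp [hj])
          rw [ih2 j hjc, e_other j (fun e => by rw [e] at hj; rw [inSub_self] at hj; simp at hj)
            (fun e => by rw [e] at hj; rw [hsubc] at hj; simp at hj)]
        · -- all links inside the pos-subtree hold afterwards
          intro j hj0 hjn hp
          by_cases hcp : inSub c ((j-1)/2) = true
          · exact ih3 j hj0 (by omega) hcp
          · rcases child_split ((j-1)/2) pos hp with hpp | hch | hch
            · -- parent is pos itself; j is one of its children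
              have hjch : j = 2*pos+1 ∨ j = 2*pos+2 := by omega
              have r_pos : (pvSiftdn h' c).getD ((j-1)/2) pvDef = vc := by
                rw [hpp, ih2 pos hpos_notin, e_pos]
              by_cases hjc : j = c
              · rw [r_pos, hjc]
                exact ih4 vc (fun j' h1 h2 => lbc j' h1 h2) c (by omega) (inSub_self c)
              · have hjnotc : inSub c j = false := by
                  rcases Nat.lt_or_ge j c with hlt2 | hge
                  · exact inSub_not_lt hlt2
                  · have : c < j := by omega
                    rw [inSub_parent c j this, (by omega : (j-1)/2 = pos)]
                    exact hpos_notin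
                rw [r_pos, ih2 j hjnotc, e_other j (by omega) hjc]
                exact pvChild_le h pos hl j hjch hjn
            · -- the parent lies in the sibling subtree 2*pos+1: everything untouched
              have hcne : c ≠ 2*pos+1 := by
                intro e; rw [← e] at hch; exact hcp hch
              have hop : 2*pos+1 ≤ (j-1)/2 := inSub_le hch
              have hoj : inSub (2*pos+1) j = true := by
                rw [inSub_parent _ j (by omega)]; exact hch
              have hjnotc : inSub c j = false := by
                cases hcj2 : inSub c j
                · rfl
                · exfalso
                  refine sub_sibling_disjoint (pos := pos) (j := j) ⟨hoj, ?_⟩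
                  rcases hcb.2.2 with e | e
                  · exact absurd e hcne
                  · rw [← e]; exact hcj2
              have hpnotc : inSub c ((j-1)/2) = false := by
                cases hcj2 : inSub c ((j-1)/2)
                · rfl
                · exact absurd hcj2 hcp
              rw [ih2 j hjnotc, ih2 ((j-1)/2) hpnotc,
                  e_other j (by omega) (fun e => by rw [e, inSub_self] at hjnotc; simp at hjnotc),
                  e_other ((j-1)/2) (by omega) (fun e => by rw [e, inSub_self] at hpnotc; simp at hpnotc)]
              exact pre j hj0 hjn hp (by omega)
            · -- the parent lies in the sibling subtree 2*pos+2: everything untouched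
              have hcne : c ≠ 2*pos+2 := by
                intro e; rw [← e] at hch; exact hcp hch
              have hop : 2*pos+2 ≤ (j-1)/2 := inSub_le hch
              have hoj : inSub (2*pos+2) j = true := by
                rw [inSub_parent _ j (by omega)]; exact hch
              have hjnotc : inSub c j = false := by
                cases hcj2 : inSub c j
                · rfl
                · exfalso
                  refine sub_sibling_disjoint (pos := pos) (j := j) ⟨?_, hoj⟩
                  rcases hcb.2.2 with e | e
                  · rw [← e]; exact hcj2
                  · exact absurd e hcne
              have hpnotc : inSub c ((j-1)/2) = false := by
                cases hcj2 : inSub c ((j-1)/2)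
                · rfl
                · exact absurd hcj2 hcp
              rw [ih2 j hjnotc, ih2 ((j-1)/2) hpnotc,
                  e_other j (by omega) (fun e => by rw [e, inSub_self] at hjnotc; simp at hjnotc),
                  e_other ((j-1)/2) (by omega) (fun e => by rw [e, inSub_self] at hpnotc; simp at hpnotc)]
              exact pre j hj0 hjn hp (by omega)
        · -- lower bounds over the pos-subtree are preserved
          intro x lb j hjn hjin
          by_cases hcj : inSub c j = true
          · refine ih4 x ?_ j (by omega) hcj
            intro j' hj'n hj'in
            by_cases e : j' = c
            · subst e; rw [e_c]; exact lb pos hposn (inSub_self pos)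
            · have : c < j' := lt_of_le_of_ne (inSub_le hj'in) (Ne.symm e)
              rw [e_other j' (by omega) e]
              exact lb j' hj'n (hsub_trans _ hj'in)
          · rw [ih2 j (by simpa using hcj)]
            by_cases e : j = pos
            · subst e; rw [e_pos]; exact lb c hcb.2.1 hsubc
            · have hjc : j ≠ c := fun h => by rw [h, inSub_self] at hcj; exact hcj rfl
              rw [e_other j e hjc]
              exact lb j hjn hjin
      · -- children exist but the smaller child is not below the root: heap already
        have hr : pvSiftdn h pos = h := by
          rw [pvSiftdn, dif_pos hl, if_neg hlt]
        have hle : pvLt (h.getD (pvChild h pos) pvDef) (h.getD pos pvDef) = false := by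
          revert hlt; cases pvLt (h.getD (pvChild h pos) pvDef) (h.getD pos pvDef) <;> simp
        rw [hr]
        refine ⟨List.Perm.refl _, fun _ _ => rfl, ?_, fun x lb => lb⟩
        intro j hj0 hjn hp
        by_cases hpp : (j-1)/2 = pos
        · have hjch : j = 2*pos+1 ∨ j = 2*pos+2 := by omega
          rw [hpp]
          exact pvLe_trans hle (pvChild_le h pos hl j hjch hjn)
        · exact pre j hj0 hjn hp hpp
    · have hr : pvSiftdn h pos = h := by rw [pvSiftdn, dif_neg hl]
      rw [hr]
      refine ⟨List.Perm.refl _, fun _ _ => rfl, ?_, fun x lb => lb⟩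
      intro j hj0 hjn hp
      exfalso
      have := no_children_single hp (show (j-1)/2 < h.length by omega) (by omega)
      omega


-- ---- corollaries for the three heapq operations A uses ----
theorem bool_eq_false {b : Bool} (h : ¬ b = true) : b = false := by
  cases b
  · rfl
  · exact absurd rfl h

theorem siftdn0_spec (h : List (Int × Char))
    (pre : ∀ j, 0 < j → j < h.length → (j-1)/2 ≠ 0 →
        pvLt (h.getD j pvDef) (h.getD ((j-1)/2) pvDef) = false) :
    IsHeap (pvSiftdn h 0) ∧ (pvSiftdn h 0).Perm h := by
  have H := siftdn_spec h.length h 0 (by omega) (fun j a b _ d => pre j a b d)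
  exact ⟨fun j a b => H.2.2.1 j a (by rw [H.1.length_eq] at b; exact b) (inSub_zero _), H.1⟩

theorem heap_root_min (h : List (Int × Char)) (hh : IsHeap h) :
    ∀ j, j < h.length → pvLt (h.getD j pvDef) (h.getD 0 pvDef) = false :=
  fun j hj => subtree_lb h 0 (fun j a b _ => hh j a b) j hj (inSub_zero j)

def pvFoldRange (k : Nat) (h : List (Int × Char)) : List (Int × Char) :=
  ((List.range k).reverse).foldl (fun acc i => pvSiftdn acc i) h

theorem foldRange_succ (k : Nat) (h : List (Int × Char)) :
    pvFoldRange (k+1) h = pvFoldRange k (pvSiftdn h k) := by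
  unfold pvFoldRange
  rw [List.range_succ, List.reverse_append]
  simp

theorem heapify_spec_aux : ∀ (k : Nat) (h : List (Int × Char)),
    (∀ j, 0 < j → j < h.length → k ≤ (j-1)/2 →
        pvLt (h.getD j pvDef) (h.getD ((j-1)/2) pvDef) = false) →
    IsHeap (pvFoldRange k h) ∧ (pvFoldRange k h).Perm h := by
  intro k
  induction k with
  | zero =>
    intro h pre
    exact ⟨fun j a b => pre j a b (by omega), List.Perm.refl _⟩
  | succ k ih =>
    intro h pre
    rw [foldRange_succ]
    by_cases hl : 2*k+1 < h.length
    · have H := siftdn_spec h.length h k (by omega) (fun j a b c d =>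
        pre j a b (by have := inSub_le c; omega))
      obtain ⟨m1, m2, m3, _⟩ := H
      have hlen1 : (pvSiftdn h k).length = h.length := m1.length_eq
      have pre' : ∀ j, 0 < j → j < (pvSiftdn h k).length → k ≤ (j-1)/2 →
          pvLt ((pvSiftdn h k).getD j pvDef) ((pvSiftdn h k).getD ((j-1)/2) pvDef) = false := by
        intro j a b c
        rw [hlen1] at b
        by_cases hin : inSub k ((j-1)/2) = true
        · exact m3 j a b hin
        · have hne : (j-1)/2 ≠ k := fun e => by rw [e, inSub_self] at hin; exact hin rfl
          have hjn : inSub k j = false :=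
            not_inSub_child (bool_eq_false hin) (by omega) (by omega)
          rw [m2 j hjn, m2 ((j-1)/2) (bool_eq_false hin)]
          exact pre j a b (by omega)
      have := ih (pvSiftdn h k) pre'
      exact ⟨this.1, this.2.trans m1⟩
    · have hr : pvSiftdn h k = h := by rw [pvSiftdn, dif_neg hl]
      rw [hr]
      refine ih h ?_
      intro j a b c
      refine pre j a b (by omega)

theorem heapify_spec (h : List (Int × Char)) :
    IsHeap (pvHeapify h) ∧ (pvHeapify h).Perm h := by
  have := heapify_spec_aux (h.length / 2) h (by intro j a b c; omega)
  exact this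

theorem heapreplace_spec (h : List (Int × Char)) (x : Int × Char) (hh : IsHeap h)
    (hn : 0 < h.length) :
    IsHeap (pvSiftdn (h.set 0 x) 0) ∧ (pvSiftdn (h.set 0 x) 0).Perm (x :: h.tail) := by
  have pre : ∀ j, 0 < j → j < (h.set 0 x).length → (j-1)/2 ≠ 0 →
      pvLt ((h.set 0 x).getD j pvDef) ((h.set 0 x).getD ((j-1)/2) pvDef) = false := by
    intro j h0 hn' hp
    rw [getD_set, if_neg (by omega), getD_set, if_neg (by omega)]
    exact hh j h0 (by simpa using hn')
  have H := siftdn0_spec _ pre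
  refine ⟨H.1, H.2.trans ?_⟩
  obtain ⟨a, t, rfl⟩ : ∃ a t, h = a :: t := by
    cases h with
    | nil => simp at hn
    | cons a t => exact ⟨a, t, rfl⟩
  simp

theorem heappop_spec (h : List (Int × Char)) (hh : IsHeap h) (hn : 2 ≤ h.length) :
    IsHeap (pvHeappop h) ∧ (h.getD 0 pvDef :: pvHeappop h).Perm h := by
  unfold pvHeappop
  have hne : ¬ h.dropLast.isEmpty = true := by
    rw [List.isEmpty_iff]
    intro e
    have := congrArg List.length e
    simp at this
    omega
  rw [if_neg hne]
  have hdl : ∀ j, j < h.length - 1 → h.dropLast.getD j pvDef = h.getD j pvDef := by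
    intro j hj
    rw [List.getD_eq_getElem?_getD, List.getD_eq_getElem?_getD, List.getElem?_dropLast]
    rw [if_pos (by simpa using hj)]
  have pre : ∀ j, 0 < j → j < (h.dropLast.set 0 (h.getLast?.getD pvDef)).length → (j-1)/2 ≠ 0 →
      pvLt ((h.dropLast.set 0 (h.getLast?.getD pvDef)).getD j pvDef)
        ((h.dropLast.set 0 (h.getLast?.getD pvDef)).getD ((j-1)/2) pvDef) = false := by
    intro j h0 hn' hp
    simp only [List.length_set, List.length_dropLast] at hn'
    rw [getD_set, if_neg (by omega), getD_set, if_neg (by omega), hdl j hn', hdl _ (by omega)]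
    exact hh j h0 (by omega)
  have H := siftdn0_spec _ pre
  refine ⟨H.1, ?_⟩
  refine ((H.2).cons _).trans ?_
  obtain ⟨a, t, rfl⟩ : ∃ a t, h = a :: t := by
    cases h with
    | nil => simp at hn
    | cons a t => exact ⟨a, t, rfl⟩
  have ht : t ≠ [] := by intro e; subst e; simp at hn
  rw [List.dropLast_cons_of_ne_nil ht]
  have hlast : (a :: t).getLast?.getD pvDef = t.getLast ht := by
    rw [List.getLast?_eq_getLast (l := a :: t) (by simp), List.getLast_cons ht]
    rfl
  rw [hlast]
  simp only [List.set_cons_zero, List.getD_cons_zero]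
  refine List.Perm.cons a ?_
  have he : t.dropLast ++ [t.getLast ht] = t := List.dropLast_append_getLast ht
  have hperm := List.perm_append_singleton (t.getLast ht) t.dropLast
  rw [he] at hperm
  exact hperm.symm


-- ---- the sorted-list side (B) ----
def SortedLe (s : List (Int × Char)) : Prop := s.Pairwise (fun u v => pvLt v u = false)

theorem pvIns_perm (s : List (Int × Char)) (x : Int × Char) : (pvIns s x).Perm (x :: s) := by
  induction s with
  | nil => rfl
  | cons y t ih =>
    rw [pvIns]
    by_cases hlt : pvLt y x = true
    · rw [if_pos hlt]
      exact (ih.cons y).trans (List.Perm.swap x y t)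
    · rw [if_neg hlt]

theorem pvIns_sorted (s : List (Int × Char)) (x : Int × Char) (hs : SortedLe s) :
    SortedLe (pvIns s x) := by
  induction s with
  | nil => simp [pvIns, SortedLe]
  | cons y t ih =>
    unfold SortedLe at hs ⊢
    obtain ⟨hy, ht⟩ := List.pairwise_cons.mp hs
    rw [pvIns]
    by_cases hlt : pvLt y x = true
    · rw [if_pos hlt, List.pairwise_cons]
      refine ⟨?_, ih ht⟩
      intro z hz
      rcases List.mem_cons.mp ((pvIns_perm t x).subset hz) with e | hz2
      · rw [e]; exact pvLt_asymm hlt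
      · exact hy z hz2
    · rw [if_neg hlt, List.pairwise_cons]
      refine ⟨?_, hs⟩
      intro z hz
      rcases List.mem_cons.mp hz with e | hz2
      · rw [e]; exact bool_eq_false hlt
      · exact pvLe_trans (bool_eq_false hlt) (hy z hz2)

theorem foldl_pvIns_perm (l : List (Int × Char)) :
    ∀ acc, (l.foldl pvIns acc).Perm (acc ++ l) := by
  induction l with
  | nil => intro acc; simp
  | cons x t ih =>
    intro acc
    simp only [List.foldl_cons]
    refine (ih (pvIns acc x)).trans ?_
    refine ((pvIns_perm acc x).append_right t).trans ?_
    simp only [List.cons_append]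
    exact List.perm_middle.symm

theorem foldl_pvIns_sorted (l : List (Int × Char)) :
    ∀ acc, SortedLe acc → SortedLe (l.foldl pvIns acc) := by
  induction l with
  | nil => intro acc h; exact h
  | cons x t ih =>
    intro acc h
    simp only [List.foldl_cons]
    exact ih (pvIns acc x) (pvIns_sorted acc x h)

theorem mem_ge_root (h : List (Int × Char)) (hh : IsHeap h) (z : Int × Char) (hz : z ∈ h) :
    pvLt z (h.getD 0 pvDef) = false := by
  rcases List.mem_iff_getElem.mp hz with ⟨j, hj, rfl⟩
  have := heap_root_min h hh j hj
  rw [List.getD_eq_getElem?_getD, List.getElem?_eq_getElem hj] at this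
  exact this

-- ---- the two loops agree step for step ----
theorem loop_eq : ∀ (f : Nat) (h s : List (Int × Char)) (out : List String),
    IsHeap h → SortedLe s → h.Perm s → pvLoopA f h out = pvLoopB f s out := by
  intro f
  induction f with
  | zero => intros; rfl
  | succ f ih =>
    intro h s out hh hs hp
    rcases s with _ | ⟨x, s1⟩
    · have : h = [] := List.length_eq_zero_iff.mp (by simpa using hp.length_eq)
      subst this; rfl
    · rcases s1 with _ | ⟨y, t⟩
      · rcases h with _ | ⟨a, h1⟩
        · exact absurd hp.length_eq (by simp)
        · rcases h1 with _ | ⟨b, r⟩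
          · rfl
          · exact absurd hp.length_eq (by simp)
      · rcases h with _ | ⟨a, h1⟩
        · exact absurd hp.length_eq (by simp)
        · rcases h1 with _ | ⟨b, r⟩
          · exact absurd hp.length_eq (by simp)
          · -- the interesting case: h = a :: b :: r, s = x :: y :: t
            have hax : a = x := by
              refine pvLt_antisymm ?_ ?_
              · rcases List.mem_cons.mp (hp.subset (List.mem_cons_self)) with e | hmem2
                · rw [e]; exact pvLt_irrefl x
                · exact (List.pairwise_cons.mp hs).1 a hmem2
              · exact mem_ge_root _ hh x (hp.symm.subset (List.mem_cons_self))
            subst hax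
            have htl : (b :: r).Perm (y :: t) := hp.cons_inv
            have hrt : (r = []) ↔ (t = []) := by
              have := htl.length_eq
              simp at this
              constructor <;> intro e <;> subst e <;>
                first
                | exact List.length_eq_zero_iff.mp (by simpa using this)
                | exact List.length_eq_zero_iff.mp (by simpa using this.symm)
            have hcond : (r ≠ [] ∨ b.1 ≠ a.1) ↔ (t ≠ [] ∨ a.1 ≠ y.1) := by
              by_cases hre : r = []
              · have hte : t = [] := hrt.mp hre
                subst hre hte
                have hby : b = y := by simpa using htl.mem_iff (a := b)
                subst hby
                constructor
                · rintro (e | e)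
                  · exact absurd rfl e
                  · exact Or.inr (Ne.symm e)
                · rintro (e | e)
                  · exact absurd rfl e
                  · exact Or.inr (Ne.symm e)
              · have hte : t ≠ [] := fun e => hre (hrt.mpr e)
                exact ⟨fun _ => Or.inl hte, fun _ => Or.inl hre⟩
            simp only [pvLoopA, pvLoopB]
            by_cases hcA : r ≠ [] ∨ b.1 ≠ a.1
            · rw [if_pos hcA, if_pos (hcond.mp hcA)]
              by_cases hneg : a.1 < -1
              · rw [if_pos hneg, if_pos hneg]
                refine ih _ _ _ ?_ ?_ ?_
                · exact (heapreplace_spec (a :: b :: r) (a.1+1, a.2) hh (by simp)).1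
                · exact pvIns_sorted (y :: t) (a.1+1, a.2) (List.pairwise_cons.mp hs).2
                · refine (heapreplace_spec (a :: b :: r) (a.1+1, a.2) hh (by simp)).2.trans ?_
                  exact (htl.cons _).trans (pvIns_perm (y :: t) (a.1+1, a.2)).symm
              · rw [if_neg hneg, if_neg hneg]
                refine ih _ _ _ ?_ ?_ ?_
                · exact (heappop_spec (a :: b :: r) hh (by simp)).1
                · exact (List.pairwise_cons.mp hs).2
                · have h2 := (heappop_spec (a :: b :: r) hh (by simp)).2
                  exact (h2.trans hp).cons_inv
            · rw [if_neg hcA, if_neg (fun hc => hcA (hcond.mpr hc))]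
              push_neg at hcA
              obtain ⟨hre, hba⟩ := hcA
              have hte : t = [] := hrt.mp hre
              subst hre hte
              have hby : b = y := by simpa using htl.mem_iff (a := b)
              subst hby
              rfl

-- ===== VERDICT (by name: the statement is the Claim_ definition above) =====
theorem solve_spec : Claim_equal_solve := by
  intro P _ _
  unfold Spec_solve solve solve_alt
  refine loop_eq _ _ _ _ ?_ ?_ ?_
  · exact (heapify_spec (P.zip pvLetters)).1
  · exact foldl_pvIns_sorted (P.zip pvLetters) [] (by simp [SortedLe])
  · exact (heapify_spec (P.zip pvLetters)).2.trans
      (by simpa using (foldl_pvIns_perm (P.zip pvLetters) []).symm)
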